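-- pv_equiv track=rewrite | github.com/bannerclick/bannerclick | bannerclick/utility/textMethods.py | concat_with_and
-- ===== SOURCE A (Python) =====
-- def concat_with_and(words: list[str]):
--     temp_srt = ''
--     for word in words:
--         if 'contains(.,' in word:
--             if temp_srt:
--                 temp_srt = temp_srt + ' and (' + word + ')'
--             else:
--                 temp_srt = temp_srt + '(' + word + ')'
--             continue
--         if temp_srt:
--             temp_srt = temp_srt + ' and contains(., "' + word + '")'
--         else:
--             temp_srt = temp_srt + 'contains(., "' + word + '")'
--     return temp_srt
-- ===== SOURCE B (Python) =====
-- def concat_with_and(words: list[str]):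
--     pieces = [
--         '(' + word + ')' if 'contains(.,' in word
--         else 'contains(., "' + word + '")'
--         for word in words
--     ]
--     return ' and '.join(pieces)
-- ===== Notes on version B (the rewrite author's own statement) =====
-- stated objective: simpler
-- what changed: Replaces the accumulator loop with its two emptiness-test branches by mapping each word to its fragment and joining with ' and ', which places the separators itself and avoids quadratic re-copying of the growing accumulator.
import Mathlib
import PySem

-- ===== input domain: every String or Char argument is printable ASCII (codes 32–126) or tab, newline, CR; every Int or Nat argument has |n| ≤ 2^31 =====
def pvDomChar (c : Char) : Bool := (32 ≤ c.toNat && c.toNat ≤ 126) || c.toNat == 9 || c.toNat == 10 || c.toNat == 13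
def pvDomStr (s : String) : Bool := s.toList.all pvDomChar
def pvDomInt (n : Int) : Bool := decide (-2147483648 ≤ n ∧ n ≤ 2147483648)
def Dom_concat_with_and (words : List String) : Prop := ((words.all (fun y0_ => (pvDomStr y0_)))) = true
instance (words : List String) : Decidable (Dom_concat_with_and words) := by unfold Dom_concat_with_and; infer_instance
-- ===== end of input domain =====

-- B replaces A's accumulator loop with emptiness-test branches by a map to fragments
-- followed by ' and '.join, which places the separators itself (objective: simpler).

-- ===== PORT A =====
def concat_with_and (words : List String) : String :=
  words.foldl (fun temp_srt word =>
    if PySem.Str.isIn "contains(.," word then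
      (if temp_srt ≠ "" then temp_srt ++ " and (" ++ word ++ ")"
       else temp_srt ++ "(" ++ word ++ ")")
    else
      (if temp_srt ≠ "" then temp_srt ++ " and contains(., \"" ++ word ++ "\")"
       else temp_srt ++ "contains(., \"" ++ word ++ "\")")) ""

-- ===== PORT B =====
def concat_with_and_alt (words : List String) : String :=
  PySem.Str.join " and " (words.map (fun word =>
    if PySem.Str.isIn "contains(.," word then "(" ++ word ++ ")"
    else "contains(., \"" ++ word ++ "\")"))

-- ===== PRECONDITION & SPEC =====
def Spec_concat_with_and (words : List String) (out : String) : Prop := out = concat_with_and_alt words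
instance (words : List String) (out : String) : Decidable (Spec_concat_with_and words out) := by unfold Spec_concat_with_and; infer_instance

-- ===== CLAIM (what is proved, stated in full; the proofs are below) =====
def Claim_equal_concat_with_and : Prop := ∀ (words : List String), Dom_concat_with_and words → Spec_concat_with_and words (concat_with_and words)

-- ===== LEMMAS AND PROOFS =====

-- the fragment B builds for one word (B's lambda, named for the proofs)
def pvPiece (w : String) : String :=
  if PySem.Str.isIn "contains(.," w then "(" ++ w ++ ")"
  else "contains(., \"" ++ w ++ "\")"

-- everything after the first fragment, with its leading separators
def pvTail : List String → String
  | [] => ""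
  | w :: ws => " and " ++ pvPiece w ++ pvTail ws

theorem pv_append_ne (a b : String) (ha : a ≠ "") : a ++ b ≠ "" := by
  intro h
  have h2 := congrArg String.toList h
  simp at h2
  exact ha (String.toList_inj.mp (by simp [h2.1]))

-- A's loop from a nonempty accumulator appends ' and ' + fragment for each word
theorem pv_foldA (ws : List String) (acc : String) (ha : acc ≠ "") :
    ws.foldl (fun temp_srt word =>
      if PySem.Str.isIn "contains(.," word then
        (if temp_srt ≠ "" then temp_srt ++ " and (" ++ word ++ ")"
         else temp_srt ++ "(" ++ word ++ ")")
      else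
        (if temp_srt ≠ "" then temp_srt ++ " and contains(., \"" ++ word ++ "\")"
         else temp_srt ++ "contains(., \"" ++ word ++ "\")")) acc
    = acc ++ pvTail ws := by
  induction ws generalizing acc with
  | nil => simp [pvTail]
  | cons w ws ih =>
    simp only [List.foldl_cons]
    by_cases hc : PySem.Str.isIn "contains(.," w = true
    · rw [if_pos hc, if_pos ha,
        ih (acc ++ " and (" ++ w ++ ")") (pv_append_ne _ _ (pv_append_ne _ _ (pv_append_ne _ _ ha)))]
      have hc' : PySem.Chars.isIn ['c','o','n','t','a','i','n','s','(','.',','] w.toList = true := by simpa using hc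
      exact String.toList_inj.mp (by simp [pvTail, pvPiece, hc'])
    · rw [if_neg hc, if_pos ha,
        ih _ (pv_append_ne _ _ (pv_append_ne _ _ (pv_append_ne _ _ ha)))]
      have hc' : ¬ PySem.Chars.isIn ['c','o','n','t','a','i','n','s','(','.',','] w.toList = true := by simpa using hc
      exact String.toList_inj.mp (by simp [pvTail, pvPiece, hc'])

-- B equals 'first fragment ++ pvTail' on a nonempty list
theorem pv_alt_cons (w : String) (ws : List String) :
    concat_with_and_alt (w :: ws) = pvPiece w ++ pvTail ws := by
  induction ws generalizing w with
  | nil =>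
    apply String.toList_inj.mp
    simp [concat_with_and_alt, PySem.Str.join, PySem.Chars.join_singleton, pvTail, pvPiece]
  | cons v vs ih =>
    apply String.toList_inj.mp
    have h := congrArg String.toList (ih v)
    simp only [concat_with_and_alt, PySem.Str.join, List.map_cons, String.toList_ofList] at h ⊢
    rw [PySem.Chars.join_cons_cons, h]
    simp [pvTail, pvPiece]

-- ===== VERDICT (by name: the statement is the Claim_ definition above) =====
theorem concat_with_and_spec : Claim_equal_concat_with_and := by
  intro words _
  unfold Spec_concat_with_and
  cases words with
  | nil => rfl
  | cons w ws =>
    rw [pv_alt_cons]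
    unfold concat_with_and
    simp only [List.foldl_cons]
    have hne : (¬ ("" : String) ≠ "") := by simp
    by_cases hc : PySem.Str.isIn "contains(.," w = true
    · rw [if_pos hc, if_neg hne, pv_foldA ws _ (by
        intro h; have := congrArg String.toList h; simp at this)]
      have hc' : PySem.Chars.isIn ['c','o','n','t','a','i','n','s','(','.',','] w.toList = true := by simpa using hc
      exact String.toList_inj.mp (by simp [pvPiece, hc'])
    · rw [if_neg hc, if_neg hne, pv_foldA ws _ (by
        intro h; have := congrArg String.toList h; simp at this)]
      have hc' : ¬ PySem.Chars.isIn ['c','o','n','t','a','i','n','s','(','.',','] w.toList = true := by simpa using hc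
      exact String.toList_inj.mp (by simp [pvPiece, hc'])
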